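-- pv_equiv track=rewrite | github.com/msu-alglab/coaster | coaster/flow.py | _compute_multiset_bound
-- ===== SOURCE A (Python) =====
-- import math
-- from collections import defaultdict, deque
--
-- def _compute_multiset_bound(list1, list2):
--     """
--     Treat twolists as multisets, return list1-list2.
--     Note: input lists should contain int or float type.
--     """
--     # convert to dicts with contents as keys, multiplicities as vals
--     size1 = len(list1)
--     size2 = len(list2)
--
--     dict1 = defaultdict(int)
--     for item in list1:
--         dict1[item] += 1
--     dict2 = defaultdict(int)
--     for item in list2:
--         dict2[item] += 1
--     num_repeated = 0
--     for key, val in dict1.items():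
--         num_repeated += min(val, dict2[key])
--     size1 -= num_repeated
--     size2 -= num_repeated
--     return num_repeated + math.ceil(max(size1, size2)/3) + \
--         min(size1, size2)
-- ===== SOURCE B (Python) =====
-- import math
--
--
-- def _compute_multiset_bound(list1, list2):
--     """
--     Treat two lists as multisets, return list1-list2 bound.
--     Sorted two-pointer merge instead of frequency dictionaries.
--     """
--     size1 = len(list1)
--     size2 = len(list2)
--     s1 = sorted(list1)
--     s2 = sorted(list2)
--     i = j = matched = 0
--     while i < size1 and j < size2:
--         if s1[i] < s2[j]:
--             i += 1
--         elif s2[j] < s1[i]: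
--             j += 1
--         else:
--             matched += 1
--             i += 1
--             j += 1
--     size1 -= matched
--     size2 -= matched
--     return matched + math.ceil(max(size1, size2) / 3) + min(size1, size2)
-- ===== Notes on version B (the rewrite author's own statement) =====
-- stated objective: alternative
-- what changed: Replaces the two frequency defaultdicts and the per-key min summation with sorted copies of both lists and a two-pointer merge whose matched-pairs counter equals the sum of per-value minimum multiplicities.
import Mathlib
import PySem

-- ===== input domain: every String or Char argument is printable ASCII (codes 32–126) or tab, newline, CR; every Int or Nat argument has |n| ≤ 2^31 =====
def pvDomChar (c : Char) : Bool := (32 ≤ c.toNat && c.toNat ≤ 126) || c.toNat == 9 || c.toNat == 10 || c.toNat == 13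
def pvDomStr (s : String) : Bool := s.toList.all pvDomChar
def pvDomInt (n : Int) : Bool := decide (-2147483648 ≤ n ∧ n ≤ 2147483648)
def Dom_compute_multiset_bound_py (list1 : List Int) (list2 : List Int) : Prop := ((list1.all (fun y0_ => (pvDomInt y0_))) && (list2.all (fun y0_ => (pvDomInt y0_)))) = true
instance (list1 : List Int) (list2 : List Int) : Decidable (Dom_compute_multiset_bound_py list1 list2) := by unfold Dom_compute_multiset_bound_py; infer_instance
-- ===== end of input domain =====

-- B replaces the two frequency dictionaries and per-key min summation by a two-pointer
-- merge of sorted copies of both lists (alternative algorithm, similar cost).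
-- math.ceil(max(size1,size2)/3) on these integer sizes is exact ceiling division,
-- ported as -((-x) // 3) in both ports.

-- ===== PORT A =====
def compute_multiset_bound_py (list1 : List Int) (list2 : List Int) : Int :=
  let size1 : Int := list1.length
  let size2 : Int := list2.length
  let dict1 : PySem.Dict Int Int := list1.foldl (fun d item => d.modify item 0 (· + 1)) PySem.Dict.empty
  let dict2 : PySem.Dict Int Int := list2.foldl (fun d item => d.modify item 0 (· + 1)) PySem.Dict.empty
  let num_repeated : Int := dict1.items.foldl (fun acc kv => acc + min kv.2 (dict2.getD kv.1 0)) 0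
  let size1 := size1 - num_repeated
  let size2 := size2 - num_repeated
  num_repeated + (-(PySem.Int.floordiv (-(max size1 size2)) 3)) + min size1 size2

-- ===== PORT B =====
-- the while loop over pointers i, j: each pointer advance consumes the head of the
-- corresponding sorted suffix
def pvMergeCount : List Int → List Int → Int
  | a :: as, b :: bs =>
    if a < b then pvMergeCount as (b :: bs)
    else if b < a then pvMergeCount (a :: as) bs
    else pvMergeCount as bs + 1
  | _, _ => 0

def compute_multiset_bound_py_alt (list1 : List Int) (list2 : List Int) : Int :=
  let size1 : Int := list1.length
  let size2 : Int := list2.length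
  let s1 := PySem.List.sorted list1 (fun x => x) false
  let s2 := PySem.List.sorted list2 (fun x => x) false
  let matched := pvMergeCount s1 s2
  let size1 := size1 - matched
  let size2 := size2 - matched
  matched + (-(PySem.Int.floordiv (-(max size1 size2)) 3)) + min size1 size2

-- ===== PRECONDITION & SPEC =====
def Spec_compute_multiset_bound_py (list1 : List Int) (list2 : List Int) (out : Int) : Prop := out = compute_multiset_bound_py_alt list1 list2
instance (list1 : List Int) (list2 : List Int) (out : Int) : Decidable (Spec_compute_multiset_bound_py list1 list2 out) := by unfold Spec_compute_multiset_bound_py; infer_instance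

-- ===== CLAIM (what is proved, stated in full; the proofs are below) =====
def Claim_equal_compute_multiset_bound_py : Prop := ∀ (list1 : List Int) (list2 : List Int), Dom_compute_multiset_bound_py list1 list2 → Spec_compute_multiset_bound_py list1 list2 (compute_multiset_bound_py list1 list2)

-- ===== LEMMAS AND PROOFS =====

-- the Nat-level common value: sum over distinct elements of the minimum multiplicity
-- equals the cardinality of the multiset intersection
lemma pv_sum_min_eq_inter_card (l1 l2 : List Int) :
    ∑ a ∈ l1.toFinset, min (l1.count a) (l2.count a)
      = ((l1 : Multiset Int) ∩ (l2 : Multiset Int)).card := by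
  have hsub : ((l1 : Multiset Int) ∩ (l2 : Multiset Int)).toFinset ⊆ l1.toFinset := by
    intro a ha
    have hmem : a ∈ (l1 : Multiset Int) ∩ (l2 : Multiset Int) := by
      simpa [Multiset.mem_toFinset] using ha
    have := Multiset.mem_of_le
      (Multiset.inter_le_left (s := (l1 : Multiset Int)) (t := (l2 : Multiset Int))) hmem
    simpa [List.mem_toFinset] using this
  have hzero : ∀ a ∈ l1.toFinset, a ∉ ((l1 : Multiset Int) ∩ (l2 : Multiset Int)).toFinset →
      min (l1.count a) (l2.count a) = 0 := by
    intro a _ ha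
    have hc : Multiset.count a ((l1 : Multiset Int) ∩ (l2 : Multiset Int)) = 0 := by
      by_contra h
      exact ha (by simpa [Multiset.mem_toFinset] using Multiset.count_pos.mp (Nat.pos_of_ne_zero h))
    rw [Multiset.count_inter] at hc
    simpa using hc
  calc ∑ a ∈ l1.toFinset, min (l1.count a) (l2.count a)
      = ∑ a ∈ ((l1 : Multiset Int) ∩ (l2 : Multiset Int)).toFinset,
          min (l1.count a) (l2.count a) := (Finset.sum_subset hsub hzero).symm
    _ = ∑ a ∈ ((l1 : Multiset Int) ∩ (l2 : Multiset Int)).toFinset,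
          Multiset.count a ((l1 : Multiset Int) ∩ (l2 : Multiset Int)) := by
          refine Finset.sum_congr rfl ?_
          intro a _
          rw [Multiset.count_inter]
          simp
    _ = _ := Multiset.toFinset_sum_count_eq _

-- A's dictionary loop computes that sum
lemma pv_A_num_repeated (l1 l2 : List Int) :
    ((l1.foldl (fun d item => d.modify item 0 (· + 1)) (PySem.Dict.empty : PySem.Dict Int Int)).items.foldl
        (fun acc kv => acc + min kv.2 ((l2.foldl (fun d item => d.modify item 0 (· + 1)) (PySem.Dict.empty : PySem.Dict Int Int)).getD kv.1 0)) 0)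
      = (((l1 : Multiset Int) ∩ (l2 : Multiset Int)).card : Int) := by
  rw [← PySem.Dict.counter_eq_foldl, ← PySem.Dict.counter_eq_foldl]
  rw [PySem.Dict.items_counter]
  rw [PySem.List.foldl_add]
  simp only [List.map_map, Function.comp_def, PySem.Dict.getD_counter, zero_add]
  rw [← pv_sum_min_eq_inter_card]
  have hnd : (PySem.Set.ofList l1).Nodup := PySem.Set.nodup_ofList l1
  have hfs : (PySem.Set.ofList l1).toFinset = l1.toFinset := by
    ext a; simp [List.mem_toFinset, PySem.Set.mem_ofList]
  rw [← hfs, ← List.sum_toFinset _ hnd]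
  push_cast
  rfl

-- the two-pointer merge on sorted lists counts the multiset intersection
lemma pv_mergeCount_eq (s1 s2 : List Int)
    (h1 : s1.Pairwise (· ≤ ·)) (h2 : s2.Pairwise (· ≤ ·)) :
    pvMergeCount s1 s2 = (((s1 : Multiset Int) ∩ (s2 : Multiset Int)).card : Int) := by
  induction s1, s2 using pvMergeCount.induct with
  | case1 a as b bs hab ih =>
    have hnot : a ∉ (b :: bs : List Int) := by
      intro hmem
      have hb : b ≤ a := by
        rcases List.mem_cons.mp hmem with h | h
        · omega
        · exact (List.pairwise_cons.mp h2).1 a h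
      omega
    have hms : ((a :: as : List Int) : Multiset Int) ∩ ((b :: bs : List Int) : Multiset Int)
        = (as : Multiset Int) ∩ ((b :: bs : List Int) : Multiset Int) := by
      rw [← Multiset.cons_coe]
      exact Multiset.cons_inter_of_neg _ (by simpa using hnot)
    rw [pvMergeCount]
    simp only [if_pos hab]
    rw [ih (List.Pairwise.of_cons h1) h2, hms]
  | case2 a as b bs hab hba ih =>
    have hnot : b ∉ (a :: as : List Int) := by
      intro hmem
      have hb : a ≤ b := by
        rcases List.mem_cons.mp hmem with h | h
        · omega
        · exact (List.pairwise_cons.mp h1).1 b h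
      omega
    have hms : ((a :: as : List Int) : Multiset Int) ∩ ((b :: bs : List Int) : Multiset Int)
        = ((a :: as : List Int) : Multiset Int) ∩ (bs : Multiset Int) := by
      rw [Multiset.inter_comm, ← Multiset.cons_coe (a := b),
          Multiset.cons_inter_of_neg _ (by simpa using hnot), Multiset.inter_comm]
    rw [pvMergeCount]
    simp only [if_neg (by omega : ¬ a < b), if_pos hba]
    rw [ih h1 (List.Pairwise.of_cons h2), hms]
  | case3 a as b bs hab hba ih =>
    have heq : a = b := by omega
    subst heq
    have hms : ((a :: as : List Int) : Multiset Int) ∩ ((a :: bs : List Int) : Multiset Int)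
        = a ::ₘ ((as : Multiset Int) ∩ (bs : Multiset Int)) := by
      rw [← Multiset.cons_coe, ← Multiset.cons_coe,
          Multiset.cons_inter_of_pos _ (Multiset.mem_cons_self a _),
          Multiset.erase_cons_head]
    rw [pvMergeCount]
    simp only [if_neg hab]
    rw [ih (List.Pairwise.of_cons h1) (List.Pairwise.of_cons h2), hms]
    simp
  | case4 s1 s2 h =>
    cases s1 with
    | nil => simp [pvMergeCount]
    | cons a as =>
      cases s2 with
      | nil => simp [pvMergeCount]
      | cons b bs => exact absurd (h a as b bs rfl rfl) (fun hf => hf)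

-- ===== VERDICT (by name: the statement is the Claim_ definition above) =====
theorem compute_multiset_bound_py_spec : Claim_equal_compute_multiset_bound_py := by
  intro list1 list2 _
  unfold Spec_compute_multiset_bound_py compute_multiset_bound_py compute_multiset_bound_py_alt
  have hB : pvMergeCount (PySem.List.sorted list1 (fun x => x) false)
        (PySem.List.sorted list2 (fun x => x) false)
      = (((list1 : Multiset Int) ∩ (list2 : Multiset Int)).card : Int) := by
    rw [pv_mergeCount_eq _ _
      (by simpa using PySem.List.sorted_pairwise list1 (fun x => x))
      (by simpa using PySem.List.sorted_pairwise list2 (fun x => x))]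
    have e1 : ((PySem.List.sorted list1 (fun x => x) false : List Int) : Multiset Int)
        = (list1 : Multiset Int) :=
      Multiset.coe_eq_coe.mpr (PySem.List.sorted_perm list1 (fun x => x) false)
    have e2 : ((PySem.List.sorted list2 (fun x => x) false : List Int) : Multiset Int)
        = (list2 : Multiset Int) :=
      Multiset.coe_eq_coe.mpr (PySem.List.sorted_perm list2 (fun x => x) false)
    rw [e1, e2]
  simp only [pv_A_num_repeated list1 list2, hB]
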